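-- pv_equiv track=rewrite | github.com/ethanwaldie1996/A2 | assignment 2.py | build_semantic_descriptors
-- ===== SOURCE A (Python) =====
-- def build_semantic_descriptors(sentences):
--     '''Return a dictionary with the semantic descriptor of everyword. This
--     semantic descriptor is stored as a value for the keyword in the dictonary
--
--     Arguements
--     sentences -- list
--     '''
--
--     #set new variable "d" to be the dictionary with every word in sentences
--     #as a key and an emtpy dictionary as it's value
--     #calls words_in_text(): to create this dictionary
--
--     d = words_in_text(sentences)
--
--     #For all keys in the dictionary of all the words in sentences, finds
--     #the number of times each word appears in the same sentence as the keyword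
--
--     for keyword in d.keys():
--
--
--         #create tempary dictionary to hold the values of frequency of
--         #everyword so that it can be added to its appropriate key in the
--         #dictionary
--         tmp = {}
--
--         #This section of for-loops goes into each word in each sentence and
--         #adds the frequency of the the words in each sentence into the
--         #dictionary for each word
--
--         #For every sentence in sentences
--         for sentence in sentences:
--
--             #if keyword in each sentence
--             if keyword in sentence:
--
--                 #for every word in the sentence, add the frequency of that
--                 #word in that sentence to the dictionary for the keyword
--                 for word in sentence:
--
--                     #creates an input for that word if it does not exist
--                     if word not in tmp.keys():
--                         tmp[word] = 1
--
--                     #Updates the frequency of the word in the sentence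
--                     else:
--                         tmp[word] += 1
--
--                 #deletes the word iself from the list
--                 if keyword in tmp.keys():
--                     del tmp[keyword]
--
--         d[keyword] = tmp #Set the dictionary at that word equal to the
--                          #semantic descriptor for that keyword
--
--     return d  #Return the semantic descriptor
--
-- def words_in_text(sentances):
--     '''Return a dictionary with all the words in the text as keys and
--     an empty dictionary as their values
--
--     Arguments:
--     sentances -- list
--     '''
--
--     words = {}   #set empty dictionary to store all words
--
--     for sentance in sentances:
--         for word in sentance:
--             if word not in words.keys():
--                 if word != '':
--                     words[word] = {}  #Sets the value to be an empty dictionary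
--
--     return words
-- ===== SOURCE B (Python) =====
-- def build_semantic_descriptors(sentences):
--     """One pass over sentences: count each sentence once, then merge that
--     counter (minus the word itself) into every distinct non-empty word's
--     descriptor."""
--     d = {}
--     for sentence in sentences:
--         c = {}
--         for word in sentence:
--             c[word] = c.get(word, 0) + 1
--         for w in c:
--             if w == '':
--                 continue
--             dw = d.setdefault(w, {})
--             for x, n in c.items():
--                 if x != w:
--                     dw[x] = dw.get(x, 0) + n
--     return d
-- ===== Notes on version B (the rewrite author's own statement) =====
-- stated objective: faster
-- what changed: A rebuilds the co-occurrence counts from scratch for every vocabulary word by rescanning all sentences (words_in_text plus a per-keyword pass); B makes a single pass over the sentences, counts each sentence once, and merges that counter (minus the word itself) into every present word's descriptor.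
import Mathlib
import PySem

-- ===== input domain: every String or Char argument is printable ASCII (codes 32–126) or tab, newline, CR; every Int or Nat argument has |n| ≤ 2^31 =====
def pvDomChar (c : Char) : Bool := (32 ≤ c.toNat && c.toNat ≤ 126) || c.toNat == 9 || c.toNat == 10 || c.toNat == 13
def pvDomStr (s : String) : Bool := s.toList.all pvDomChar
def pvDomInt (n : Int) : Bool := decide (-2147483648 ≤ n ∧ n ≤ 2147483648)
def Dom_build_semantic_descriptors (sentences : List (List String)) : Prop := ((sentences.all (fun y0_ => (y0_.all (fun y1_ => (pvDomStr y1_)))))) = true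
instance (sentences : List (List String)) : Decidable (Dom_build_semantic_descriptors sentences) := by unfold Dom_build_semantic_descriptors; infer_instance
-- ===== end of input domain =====

-- B replaces A's per-keyword rescan of all sentences by a single pass that counts each
-- sentence once and merges that counter into every present word's descriptor.
-- Python dicts are rendered as association lists in insertion order; key order is matched exactly.

-- ===== PORT A =====
-- words_in_text(sentances): every nonempty word, first occurrence order, value {}
def words_in_text (sentances : List (List String)) : PySem.Dict String (PySem.Dict String Int) :=
  sentances.foldl (fun words sentance =>
    sentance.foldl (fun words word =>
      if ¬ words.contains word then
        (if word ≠ "" then words.insert word PySem.Dict.empty else words)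
      else words) words) PySem.Dict.empty

-- the body of A's outer loop for one keyword: tmp accumulated over all sentences
def bsdA_tmp (sentences : List (List String)) (keyword : String) : PySem.Dict String Int :=
  sentences.foldl (fun tmp sentence =>
    if keyword ∈ sentence then
      let tmp := sentence.foldl (fun tmp word =>
        if ¬ tmp.contains word then tmp.insert word 1
        else tmp.modify word 0 (· + 1)) tmp
      if tmp.contains keyword then tmp.erase keyword else tmp
    else tmp) PySem.Dict.empty

def build_semantic_descriptors (sentences : List (List String)) : List (String × List (String × Int)) :=
  let d := words_in_text sentences
  -- for keyword in d.keys(): … ; d[keyword] = tmp   (values change, the key list does not)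
  let d := d.keys.foldl (fun d keyword => d.insert keyword (bsdA_tmp sentences keyword)) d
  d.items.map (fun p => (p.1, p.2.items))

-- ===== PORT B =====
-- one step of B's single pass: count the sentence, then merge the counter (minus the word
-- itself) into every distinct nonempty word's descriptor.  In Source B `dw = d.setdefault(w, {})`
-- is mutated in place; the net effect on d is exactly `d[w] = merged`, rendered as d.insert.
def bsdB_step (d : PySem.Dict String (PySem.Dict String Int)) (sentence : List String) :
    PySem.Dict String (PySem.Dict String Int) :=
  let c := sentence.foldl (fun c word => c.insert word (c.getD word 0 + 1)) PySem.Dict.empty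
  c.keys.foldl (fun d w =>
    if w = "" then d
    else
      let dw := d.getD w PySem.Dict.empty
      let dw := c.items.foldl (fun dw p =>
        if p.1 ≠ w then dw.insert p.1 (dw.getD p.1 0 + p.2) else dw) dw
      d.insert w dw) d

def build_semantic_descriptors_alt (sentences : List (List String)) : List (String × List (String × Int)) :=
  (sentences.foldl bsdB_step PySem.Dict.empty).items.map (fun p => (p.1, p.2.items))

-- ===== PRECONDITION & SPEC =====
def Spec_build_semantic_descriptors (sentences : List (List String)) (out : List (String × List (String × Int))) : Prop := out = build_semantic_descriptors_alt sentences
instance (sentences : List (List String)) (out : List (String × List (String × Int))) : Decidable (Spec_build_semantic_descriptors sentences out) := by unfold Spec_build_semantic_descriptors; infer_instance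

-- ===== CLAIM (what is proved, stated in full; the proofs are below) =====
def Claim_equal_build_semantic_descriptors : Prop := ∀ (sentences : List (List String)), Dom_build_semantic_descriptors sentences → Spec_build_semantic_descriptors sentences (build_semantic_descriptors sentences)

-- ===== LEMMAS AND PROOFS =====

-- ---- small facts about PySem.Set ----

theorem ofList_self (l : List String) (h : l.Nodup) : PySem.Set.ofList l = l := by
  rw [← PySem.Set.update_nil_left, PySem.Set.update_eq_append_of_disjoint _ _ h (by intro x _ hx; exact (List.not_mem_nil hx))]
  rfl

theorem ofList_idem (l : List String) :
    PySem.Set.ofList (PySem.Set.ofList l) = PySem.Set.ofList l :=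
  ofList_self _ (PySem.Set.nodup_ofList l)

theorem update_nodup (s : PySem.Set String) (l : List String) (h : s.Nodup) :
    (PySem.Set.update s l).Nodup := by
  rw [PySem.Set.update_eq_append_filter]
  refine List.Nodup.append h ((PySem.Set.nodup_ofList l).filter _) ?_
  intro x hxs hxf
  have := List.of_mem_filter hxf
  simp [PySem.Set.contains] at this
  exact this hxs

theorem update_ofList (s : PySem.Set String) (l : List String) :
    PySem.Set.update s (PySem.Set.ofList l) = PySem.Set.update s l := by
  rw [PySem.Set.update_eq_append_filter, PySem.Set.update_eq_append_filter, ofList_idem]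

theorem update_self (s : PySem.Set String) : PySem.Set.update s s = s := by
  rw [PySem.Set.update_eq_append_filter,
      List.filter_eq_nil_iff.mpr (fun y hy => by
        simp [PySem.Set.contains]
        exact (PySem.Set.mem_ofList s y).mp hy),
      List.append_nil]

theorem ofList_filter (l : List String) (p : String → Bool) :
    PySem.Set.ofList (l.filter p) = (PySem.Set.ofList l).filter p := by
  induction l using List.reverseRecOn with
  | nil => rfl
  | append_singleton l y ih =>
    rw [List.filter_append, PySem.Set.ofList_append, PySem.Set.ofList_append]
    by_cases hy : p y = true
    · rw [List.filter_cons, if_pos hy]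
      show PySem.Set.update _ [y] = (PySem.Set.update _ [y]).filter p
      rw [PySem.Set.update_cons, PySem.Set.update_nil, PySem.Set.update_cons, PySem.Set.update_nil]
      by_cases hc : y ∈ l
      · rw [show PySem.Set.add (PySem.Set.ofList (l.filter p)) y = PySem.Set.ofList (l.filter p) from ?_,
            show PySem.Set.add (PySem.Set.ofList l) y = PySem.Set.ofList l from ?_, ih]
        · simp [PySem.Set.add, PySem.Set.contains, PySem.Set.mem_ofList, hc]
        · simp [PySem.Set.add, PySem.Set.contains, PySem.Set.mem_ofList, hc, hy]
      · rw [show PySem.Set.add (PySem.Set.ofList (l.filter p)) y = PySem.Set.ofList (l.filter p) ++ [y] from ?_,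
            show PySem.Set.add (PySem.Set.ofList l) y = PySem.Set.ofList l ++ [y] from ?_, ih,
            List.filter_append, List.filter_cons, if_pos hy]
        · simp
        · simp [PySem.Set.add, PySem.Set.contains, PySem.Set.mem_ofList, hc]
        · simp [PySem.Set.add, PySem.Set.contains, PySem.Set.mem_ofList, hc, hy]
    · rw [List.filter_cons, if_neg hy, List.filter_nil]
      rw [PySem.Set.update_nil, PySem.Set.update_cons, PySem.Set.update_nil]
      by_cases hc : y ∈ l
      · rw [show PySem.Set.add (PySem.Set.ofList l) y = PySem.Set.ofList l from ?_, ih]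
        simp [PySem.Set.add, PySem.Set.contains, PySem.Set.mem_ofList, hc]
      · rw [show PySem.Set.add (PySem.Set.ofList l) y = PySem.Set.ofList l ++ [y] from ?_, ih,
            List.filter_append, List.filter_cons, if_neg hy, List.filter_nil, List.append_nil]
        simp [PySem.Set.add, PySem.Set.contains, PySem.Set.mem_ofList, hc]

-- ---- facts about Dict.erase ----

theorem erase_keys {ν : Type} (d : PySem.Dict String ν) (k : String) :
    (d.erase k).keys = d.keys.filter (fun x => !(x == k)) := by
  show List.map _ _ = _
  rw [show (PySem.Dict.keys d) = d.items.map (fun p => p.1) from rfl, List.filter_map]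
  rfl

theorem erase_getD (d : PySem.Dict String Int) (k x : String) (h : x ≠ k) :
    (d.erase k).getD x 0 = d.getD x 0 := by
  simp [PySem.Dict.erase, PySem.Dict.getD, PySem.Dict.get?]
  induction d.items with
  | nil => rfl
  | cons p rest ih =>
    by_cases hp : p.1 = x
    · simp [hp, h, List.find?]
    · simp [List.find?]
      by_cases hk : p.1 = k
      · have hkx : (k == x) = false := by simp; exact fun e => h e.symm
        simp [hk, hkx, ih]
      · have hpx : (p.1 == x) = false := by simp [hp]
        simp [hp, hk, ih]; rw [hpx]

-- ---- A's count loop is the counter loop ----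

theorem countFold_eq_modify (t : PySem.Dict String Int) (s : List String) :
    s.foldl (fun tmp word =>
        if ¬ tmp.contains word then tmp.insert word 1
        else tmp.modify word 0 (· + 1)) t
      = s.foldl (fun tmp word => tmp.modify word 0 (· + 1)) t := by
  have h : (fun (tmp : PySem.Dict String Int) word =>
      if ¬ tmp.contains word then tmp.insert word 1
      else tmp.modify word 0 (· + 1)) = (fun tmp word => tmp.modify word 0 (· + 1)) := by
    funext tmp word
    by_cases hc : tmp.contains word = true
    · simp [hc]
    · simp only [hc]
      show tmp.insert word 1 = tmp.modify word 0 (· + 1)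
      simp [PySem.Dict.modify, PySem.Dict.getD_of_not_contains tmp 0 (by simpa using hc)]
  rw [h]

-- ---- B's merge of one sentence, characterised ----

def mergeF (k : String) (t : PySem.Dict String Int) (s : List String) : PySem.Dict String Int :=
  (PySem.Dict.counter s).items.foldl (fun dw p =>
    if p.1 ≠ k then dw.insert p.1 (dw.getD p.1 0 + p.2) else dw) t

theorem mergeFold_getD (k x : String) (f : String → Int) (l : List String) (hnd : l.Nodup)
    (t : PySem.Dict String Int) (hx : x ≠ k) :
    ((l.map (fun y => (y, f y))).foldl (fun dw p =>
        if p.1 ≠ k then dw.insert p.1 (dw.getD p.1 0 + p.2) else dw) t).getD x 0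
      = if x ∈ l then t.getD x 0 + f x else t.getD x 0 := by
  induction l generalizing t with
  | nil => simp
  | cons y l ih =>
    rw [List.map_cons, List.foldl_cons]
    rcases List.nodup_cons.mp hnd with ⟨hy, hnd'⟩
    by_cases hyk : y = k
    · simp only [hyk]
      rw [if_neg (by simp)]
      rw [ih hnd' t]
      by_cases hm : x ∈ l
      · rw [if_pos hm, if_pos (by simp [hm])]
      · rw [if_neg hm, if_neg (by simp [hm, hx])]
    · rw [if_pos (by simpa using hyk)]
      by_cases hxy : x = y
      · rw [ih hnd' _]
        rw [if_neg (hxy ▸ hy), if_pos (by simp [hxy])]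
        rw [hxy, PySem.Dict.getD_insert_self]
      · rw [ih hnd' _, PySem.Dict.getD_insert_of_ne _ _ _ hxy]
        by_cases hm : x ∈ l
        · rw [if_pos hm, if_pos (by simp [hm])]
        · rw [if_neg hm, if_neg (by simp [hxy, hm])]

theorem mergeF_getD (k : String) (t : PySem.Dict String Int) (s : List String) (x : String)
    (hx : x ≠ k) : (mergeF k t s).getD x 0 = t.getD x 0 + s.count x := by
  unfold mergeF
  rw [PySem.Dict.items_counter,
      mergeFold_getD k x (fun y => (s.count y : Int)) (PySem.Set.ofList s) (PySem.Set.nodup_ofList s) t hx]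
  by_cases hm : x ∈ s
  · rw [if_pos ((PySem.Set.mem_ofList s x).mpr hm)]
  · rw [if_neg (fun h => hm ((PySem.Set.mem_ofList s x).mp h)),
        List.count_eq_zero.mpr hm]
    simp

theorem mergeFold_keys (k : String) (f : String → Int) (l : List String)
    (t : PySem.Dict String Int) :
    ((l.map (fun y => (y, f y))).foldl (fun dw p =>
        if p.1 ≠ k then dw.insert p.1 (dw.getD p.1 0 + p.2) else dw) t).keys
      = PySem.Set.update t.keys (l.filter (fun x => !(x == k))) := by
  induction l generalizing t with
  | nil => rw [List.map_nil, List.foldl_nil, List.filter_nil, PySem.Set.update_nil]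
  | cons y l ih =>
    rw [List.map_cons, List.foldl_cons, List.filter_cons]
    by_cases hyk : y = k
    · rw [if_neg (by simp [hyk]), if_neg (by simp [hyk]), ih]
    · rw [if_pos (by simpa using hyk), if_pos (by simpa using hyk), ih,
          PySem.Set.update_cons]
      congr 1
      by_cases hc : y ∈ t.keys
      · rw [PySem.Dict.keys_insert_of_contains _ _ ((PySem.Dict.contains_iff_mem_keys t y).mpr hc)]
        simp [PySem.Set.add, PySem.Set.contains, hc]
      · rw [PySem.Dict.keys_insert_of_not_contains _ _ (by
          rw [← Bool.not_eq_true]; exact fun h => hc ((PySem.Dict.contains_iff_mem_keys t y).mp h))]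
        simp [PySem.Set.add, PySem.Set.contains, hc]

theorem mergeF_keys (k : String) (t : PySem.Dict String Int) (s : List String) :
    (mergeF k t s).keys = PySem.Set.update t.keys ((PySem.Set.ofList s).filter (fun x => !(x == k))) := by
  unfold mergeF
  rw [PySem.Dict.items_counter, mergeFold_keys]

-- ---- per-sentence agreement: A's count-then-delete = B's merge ----

def countErase (k : String) (t : PySem.Dict String Int) (s : List String) : PySem.Dict String Int :=
  let t := s.foldl (fun tmp word =>
    if ¬ tmp.contains word then tmp.insert word 1
    else tmp.modify word 0 (· + 1)) t
  if t.contains k then t.erase k else t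

theorem countErase_eq_mergeF (k : String) (t : PySem.Dict String Int) (s : List String)
    (hk : k ∉ t.keys) (hnd : t.keys.Nodup) (hks : k ∈ s) :
    countErase k t s = mergeF k t s := by
  unfold countErase
  rw [countFold_eq_modify]
  set t' := s.foldl (fun tmp word => tmp.modify word 0 (· + 1)) t with ht'
  have hkeys : t'.keys = PySem.Set.update t.keys s :=
    PySem.Dict.keys_foldl_modify s 0 (fun _ _ => (· + 1)) t
  have hnd' : t'.keys.Nodup := hkeys ▸ update_nodup _ _ hnd
  have hgd : ∀ x, t'.getD x 0 = t.getD x 0 + s.count x := fun x =>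
    PySem.Dict.getD_foldl_modify_add_one s t x
  have hmem : k ∈ t'.keys := by
    rw [hkeys, PySem.Set.update_eq_append_filter]
    refine List.mem_append.mpr (Or.inr ?_)
    refine List.mem_filter.mpr ⟨(PySem.Set.mem_ofList s k).mpr hks, ?_⟩
    simp [PySem.Set.contains]
    exact hk
  rw [if_pos ((PySem.Dict.contains_iff_mem_keys t' k).mpr hmem)]
  have hkA : (t'.erase k).keys = PySem.Set.update t.keys ((PySem.Set.ofList s).filter (fun x => !(x == k))) := by
    rw [erase_keys, hkeys, PySem.Set.update_eq_append_filter, PySem.Set.update_eq_append_filter,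
        List.filter_append, List.filter_eq_self.mpr (fun x hx => by simp; exact fun e => hk (e ▸ hx)),
        ofList_self _ (((PySem.Set.nodup_ofList s)).filter _), List.filter_filter, List.filter_filter]
    congr 1
    exact List.filter_congr (fun x _ => Bool.and_comm _ _)
  have hndA : (t'.erase k).keys.Nodup := by rw [erase_keys]; exact hnd'.filter _
  have hndB : (mergeF k t s).keys.Nodup := by rw [mergeF_keys]; exact update_nodup _ _ hnd
  apply PySem.Dict.ext
  rw [PySem.Dict.items_eq_map_keys _ hndA 0, PySem.Dict.items_eq_map_keys _ hndB 0,
      mergeF_keys, ← hkA]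
  refine List.map_congr_left (fun x hx => ?_)
  have hxk : x ≠ k := by
    rw [erase_keys] at hx
    have := (List.mem_filter.mp hx).2
    simpa using this
  rw [erase_getD _ _ _ hxk, hgd, mergeF_getD _ _ _ _ hxk]

-- ---- B's big-dict step, characterised ----

theorem bsdB_step_eq (d : PySem.Dict String (PySem.Dict String Int)) (s : List String) :
    bsdB_step d s = (PySem.Set.ofList s).foldl
      (fun d w => if w = "" then d
        else d.insert w (mergeF w (d.getD w PySem.Dict.empty) s)) d := by
  unfold bsdB_step
  rw [PySem.Dict.foldl_insert_getD_add_one_eq_counter]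
  show List.foldl _ d (PySem.Dict.counter s).keys = _
  rw [PySem.Dict.keys_counter]
  rfl

theorem foldlIns_getD {ν : Type} (l : List String) (h : String → ν → ν)
    (d : PySem.Dict String ν) (x : String) (dflt : ν) (hnd : l.Nodup) :
    (l.foldl (fun d w => if w = "" then d else d.insert w (h w (d.getD w dflt))) d).getD x dflt
      = if x ∈ l ∧ x ≠ "" then h x (d.getD x dflt) else d.getD x dflt := by
  induction l generalizing d with
  | nil => simp
  | cons y l ih =>
    rw [List.foldl_cons]
    rcases List.nodup_cons.mp hnd with ⟨hy, hnd'⟩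
    by_cases hye : y = ""
    · rw [if_pos hye, ih _ hnd']
      by_cases hm : x ∈ l ∧ x ≠ ""
      · rw [if_pos hm, if_pos ⟨List.mem_cons_of_mem _ hm.1, hm.2⟩]
      · rw [if_neg hm, if_neg (by
          rintro ⟨hx1, hx2⟩
          rcases List.mem_cons.mp hx1 with h1 | h1
          · exact hx2 (h1.trans hye)
          · exact hm ⟨h1, hx2⟩)]
    · rw [if_neg hye, ih _ hnd']
      by_cases hxy : x = y
      · rw [if_neg (fun hm => hy (hxy ▸ hm.1)), if_pos ⟨by simp [hxy], hxy ▸ hye⟩,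
            hxy, PySem.Dict.getD_insert_self]
      · rw [PySem.Dict.getD_insert_of_ne _ _ _ hxy]
        by_cases hm : x ∈ l ∧ x ≠ ""
        · rw [if_pos hm, if_pos ⟨List.mem_cons_of_mem _ hm.1, hm.2⟩]
        · rw [if_neg hm, if_neg (by
            rintro ⟨hx1, hx2⟩
            rcases List.mem_cons.mp hx1 with h1 | h1
            · exact hxy h1
            · exact hm ⟨h1, hx2⟩)]

theorem foldlIns_keys {ν : Type} (l : List String) (h : String → ν → ν)
    (d : PySem.Dict String ν) (dflt : ν) :
    (l.foldl (fun d w => if w = "" then d else d.insert w (h w (d.getD w dflt))) d).keys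
      = PySem.Set.update d.keys (l.filter (fun w => !(w == ""))) := by
  induction l generalizing d with
  | nil => rw [List.foldl_nil, List.filter_nil, PySem.Set.update_nil]
  | cons y l ih =>
    rw [List.foldl_cons, List.filter_cons]
    by_cases hye : y = ""
    · rw [if_pos hye, if_neg (by simp [hye]), ih]
    · rw [if_neg hye, if_pos (by simpa using hye), ih, PySem.Set.update_cons]
      congr 1
      by_cases hc : y ∈ d.keys
      · rw [PySem.Dict.keys_insert_of_contains _ _ ((PySem.Dict.contains_iff_mem_keys d y).mpr hc)]
        simp [PySem.Set.add, PySem.Set.contains, hc]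
      · rw [PySem.Dict.keys_insert_of_not_contains _ _ (by
          rw [← Bool.not_eq_true]; exact fun hh => hc ((PySem.Dict.contains_iff_mem_keys d y).mp hh))]
        simp [PySem.Set.add, PySem.Set.contains, hc]

-- ---- whole-input assembly ----

-- the canonical key list (first occurrences of nonempty words)
def keyChain (sentences : List (List String)) : List String :=
  sentences.foldl (fun ks s => PySem.Set.update ks (s.filter (fun w => !(w == "")))) []

theorem witInner_keys (s : List String) (w : PySem.Dict String (PySem.Dict String Int)) :
    (s.foldl (fun words word =>
        if ¬ words.contains word then
          (if word ≠ "" then words.insert word PySem.Dict.empty else words)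
        else words) w).keys
      = PySem.Set.update w.keys (s.filter (fun x => !(x == ""))) := by
  induction s generalizing w with
  | nil => rw [List.foldl_nil, List.filter_nil, PySem.Set.update_nil]
  | cons y s ih =>
    rw [List.foldl_cons, List.filter_cons]
    by_cases hc : w.contains y = true
    · rw [if_neg (by simp [hc])]
      by_cases hye : y = ""
      · rw [if_neg (by simp [hye]), ih]
      · rw [if_pos (by simpa using hye), ih, PySem.Set.update_cons,
            show PySem.Set.add w.keys y = w.keys from (by
              simp [PySem.Set.add, PySem.Set.contains, (PySem.Dict.contains_iff_mem_keys w y).mp hc])]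
    · rw [if_pos (by simp [hc])]
      by_cases hye : y = ""
      · rw [if_neg (by simp [hye]), if_neg (by simp [hye]), ih]
      · rw [if_pos hye, if_pos (by simpa using hye), ih, PySem.Set.update_cons,
            PySem.Dict.keys_insert_of_not_contains _ _ (by simpa using hc),
            show PySem.Set.add w.keys y = w.keys ++ [y] from (by
              simp [PySem.Set.add, PySem.Set.contains]
              exact fun hm => absurd ((PySem.Dict.contains_iff_mem_keys w y).mpr hm) (by simpa using hc))]

theorem wit_keys_gen (sentences : List (List String)) (w : PySem.Dict String (PySem.Dict String Int)) :
    (sentences.foldl (fun words sentance =>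
        sentance.foldl (fun words word =>
          if ¬ words.contains word then
            (if word ≠ "" then words.insert word PySem.Dict.empty else words)
          else words) words) w).keys
      = sentences.foldl (fun ks s => PySem.Set.update ks (s.filter (fun x => !(x == "")))) w.keys := by
  induction sentences generalizing w with
  | nil => rfl
  | cons s ss ih => rw [List.foldl_cons, List.foldl_cons, ih, witInner_keys]

theorem wit_keys (sentences : List (List String)) :
    (words_in_text sentences).keys = keyChain sentences := by
  unfold words_in_text keyChain
  rw [wit_keys_gen]
  rfl

theorem keyChain_gen_nodup (sentences : List (List String)) (ks : PySem.Set String)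
    (h : ks.Nodup) :
    (sentences.foldl (fun ks s => PySem.Set.update ks (s.filter (fun w => !(w == "")))) ks).Nodup := by
  induction sentences generalizing ks with
  | nil => exact h
  | cons s ss ih => exact ih _ (update_nodup _ _ h)

theorem keyChain_nodup (sentences : List (List String)) : (keyChain sentences).Nodup :=
  keyChain_gen_nodup sentences [] List.nodup_nil

theorem keyChain_gen_ne_empty (sentences : List (List String)) (ks : PySem.Set String)
    (h : ∀ x ∈ ks, x ≠ "") (x : String)
    (hx : x ∈ sentences.foldl (fun ks s => PySem.Set.update ks (s.filter (fun w => !(w == "")))) ks) :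
    x ≠ "" := by
  induction sentences generalizing ks with
  | nil => exact h x hx
  | cons s ss ih =>
    refine ih _ ?_ hx
    intro y hy
    dsimp only at hy
    rw [PySem.Set.update_eq_append_filter] at hy
    rcases List.mem_append.mp hy with h1 | h1
    · exact h y h1
    · have := (PySem.Set.mem_ofList _ y).mp (List.mem_of_mem_filter h1)
      have := (List.mem_filter.mp this).2
      simpa using this

theorem keyChain_ne_empty (sentences : List (List String)) (x : String)
    (hx : x ∈ keyChain sentences) : x ≠ "" :=
  keyChain_gen_ne_empty sentences [] (by intro y hy; exact absurd hy (List.not_mem_nil)) x hx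

theorem B_keys_gen (sentences : List (List String)) (d : PySem.Dict String (PySem.Dict String Int)) :
    (sentences.foldl bsdB_step d).keys
      = sentences.foldl (fun ks s => PySem.Set.update ks (s.filter (fun w => !(w == "")))) d.keys := by
  induction sentences generalizing d with
  | nil => rfl
  | cons s ss ih =>
    rw [List.foldl_cons, List.foldl_cons, ih, bsdB_step_eq,
        foldlIns_keys (PySem.Set.ofList s) (fun w v => mergeF w v s) d PySem.Dict.empty,
        ← ofList_filter, update_ofList]

theorem B_keys (sentences : List (List String)) :
    (sentences.foldl bsdB_step PySem.Dict.empty).keys = keyChain sentences := by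
  rw [B_keys_gen]; rfl

theorem B_getD_gen (sentences : List (List String)) (x : String) (hx : x ≠ "")
    (d : PySem.Dict String (PySem.Dict String Int)) :
    (sentences.foldl bsdB_step d).getD x PySem.Dict.empty =
      sentences.foldl (fun t s => if x ∈ s then mergeF x t s else t) (d.getD x PySem.Dict.empty) := by
  induction sentences generalizing d with
  | nil => rfl
  | cons s ss ih =>
    rw [List.foldl_cons, List.foldl_cons, ih, bsdB_step_eq,
        foldlIns_getD (PySem.Set.ofList s) (fun w v => mergeF w v s) d x PySem.Dict.empty
          (PySem.Set.nodup_ofList s)]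
    by_cases hm : x ∈ s
    · rw [if_pos ⟨(PySem.Set.mem_ofList s x).mpr hm, hx⟩, if_pos hm]
    · rw [if_neg (fun hc => hm ((PySem.Set.mem_ofList s x).mp hc.1)), if_neg hm]

theorem B_getD (sentences : List (List String)) (x : String) (hx : x ≠ "") :
    (sentences.foldl bsdB_step PySem.Dict.empty).getD x PySem.Dict.empty =
      sentences.foldl (fun t s => if x ∈ s then mergeF x t s else t) PySem.Dict.empty := by
  rw [B_getD_gen sentences x hx]
  rfl

theorem chain_gen (k : String) (sentences : List (List String)) (t : PySem.Dict String Int)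
    (hk : k ∉ t.keys) (hnd : t.keys.Nodup) :
    sentences.foldl (fun t s => if k ∈ s then countErase k t s else t) t
      = sentences.foldl (fun t s => if k ∈ s then mergeF k t s else t) t := by
  induction sentences generalizing t with
  | nil => rfl
  | cons s ss ih =>
    rw [List.foldl_cons, List.foldl_cons]
    by_cases hm : k ∈ s
    · rw [if_pos hm, if_pos hm, countErase_eq_mergeF k t s hk hnd hm]
      refine ih _ ?_ ?_
      · rw [mergeF_keys, PySem.Set.update_eq_append_filter]
        intro hmem
        rcases List.mem_append.mp hmem with h1 | h1
        · exact hk h1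
        · have h2 := List.mem_of_mem_filter h1
          have h3 := (List.mem_filter.mp ((ofList_self _ ((PySem.Set.nodup_ofList s).filter _)) ▸ h2)).2
          simpa using h3
      · rw [mergeF_keys]; exact update_nodup _ _ hnd
    · rw [if_neg hm, if_neg hm]; exact ih t hk hnd

theorem chain_eq (k : String) (sentences : List (List String)) :
    bsdA_tmp sentences k =
      sentences.foldl (fun t s => if k ∈ s then mergeF k t s else t) PySem.Dict.empty := by
  have h1 : bsdA_tmp sentences k
      = sentences.foldl (fun t s => if k ∈ s then countErase k t s else t) PySem.Dict.empty := rfl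
  rw [h1, chain_gen k sentences PySem.Dict.empty (by simp [PySem.Dict.keys_empty]) (by simp [PySem.Dict.keys_empty])]

theorem getD_foldl_insert_nodup {ν : Type} (l : List String) (g : String → ν)
    (d : PySem.Dict String ν) (x : String) (dflt : ν) (hnd : l.Nodup) :
    (l.foldl (fun d k => d.insert k (g k)) d).getD x dflt =
      if x ∈ l then g x else d.getD x dflt := by
  induction l generalizing d with
  | nil => simp
  | cons y l ih =>
    rw [List.foldl_cons]
    rcases List.nodup_cons.mp hnd with ⟨hy, hnd'⟩
    by_cases hxy : x = y
    · rw [ih _ hnd', if_neg (hxy ▸ hy), if_pos (by simp [hxy]), hxy, PySem.Dict.getD_insert_self]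
    · rw [ih _ hnd', PySem.Dict.getD_insert_of_ne _ _ _ hxy]
      by_cases hm : x ∈ l
      · rw [if_pos hm, if_pos (List.mem_cons_of_mem _ hm)]
      · rw [if_neg hm, if_neg (by
          intro h1; rcases List.mem_cons.mp h1 with h1 | h1
          · exact hxy h1
          · exact hm h1)]

theorem A_keys (sentences : List (List String)) :
    ((words_in_text sentences).keys.foldl
        (fun d keyword => d.insert keyword (bsdA_tmp sentences keyword))
        (words_in_text sentences)).keys = keyChain sentences := by
  rw [PySem.Dict.keys_foldl_insert, update_self, wit_keys]

theorem big_dicts_eq (sentences : List (List String)) :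
    (words_in_text sentences).keys.foldl
        (fun d keyword => d.insert keyword (bsdA_tmp sentences keyword))
        (words_in_text sentences)
      = sentences.foldl bsdB_step PySem.Dict.empty := by
  have hndK : (keyChain sentences).Nodup := keyChain_nodup sentences
  have hndA : ((words_in_text sentences).keys.foldl
      (fun d keyword => d.insert keyword (bsdA_tmp sentences keyword))
      (words_in_text sentences)).keys.Nodup := by rw [A_keys]; exact hndK
  have hndB : (sentences.foldl bsdB_step PySem.Dict.empty).keys.Nodup := by
    rw [B_keys]; exact hndK
  apply PySem.Dict.ext
  rw [PySem.Dict.items_eq_map_keys _ hndA PySem.Dict.empty,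
      PySem.Dict.items_eq_map_keys _ hndB PySem.Dict.empty,
      A_keys, B_keys]
  refine List.map_congr_left (fun x hx => ?_)
  have hxe : x ≠ "" := keyChain_ne_empty sentences x hx
  rw [getD_foldl_insert_nodup _ _ _ _ _ (by rw [wit_keys]; exact hndK),
      if_pos (by rw [wit_keys]; exact hx),
      B_getD sentences x hxe, chain_eq]

-- ===== VERDICT (by name: the statement is the Claim_ definition above) =====
theorem build_semantic_descriptors_spec : Claim_equal_build_semantic_descriptors := by
  intro sentences _
  show build_semantic_descriptors sentences = build_semantic_descriptors_alt sentences
  show ((words_in_text sentences).keys.foldl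
      (fun d keyword => d.insert keyword (bsdA_tmp sentences keyword))
      (words_in_text sentences)).items.map (fun p => (p.1, p.2.items))
    = ((sentences.foldl bsdB_step PySem.Dict.empty).items.map (fun p => (p.1, p.2.items)))
  rw [big_dicts_eq]
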